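-- pv_equiv track=rewrite | github.com/VeeraSaiJoshik/AllStateJarvis | TUI/solutions/dp/digit_dp.py | count_sum_div_k_no_zero
-- ===== SOURCE A (Python) =====
-- from functools import lru_cache
--
-- def count_sum_div_k_no_zero(N, k):
--     """
--     Count integers in [1..N] whose digit sum is divisible by k and contain no '0'.
--
--     Example:
--         count_sum_div_k_no_zero(99, 3) → 27
--         # 2-digit numbers with no zero and digit sum div by 3:
--         # numbers where d1+d2 ≡ 0 (mod 3) and d1,d2 ∈ [1..9]
--     """
--     s = str(N)
--     n = len(s)
--
--     @lru_cache(maxsize=None)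
--     def dp(pos, rem, tight, started):
--         if pos == n:
--             return 1 if (started and rem == 0) else 0
--         limit = int(s[pos]) if tight else 9
--         total = 0
--         for d in range(0, limit + 1):
--             if started and d == 0:
--                 continue  # no zero digits after number has started
--             if not started and d == 0:
--                 total += dp(pos + 1, 0, tight and (d == limit), False)
--                 continue
--             new_rem = (rem + d) % k
--             total  += dp(pos + 1, new_rem, tight and (d == limit), True)
--         return total
--
--     result = dp(0, 0, True, False)
--     dp.cache_clear()
--     return result
-- ===== SOURCE B (Python) =====
-- def count_sum_div_k_no_zero(N, k):
--     """Count integers in [1..N] with no zero digit and digit sum divisible by k.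
--
--     Table-based counting: precompute f[L][t] = number of length-L digit strings
--     over 1..9 with digit sum exactly t (independent of k), then count numbers
--     below N with one left-to-right pass over str(N).
--     """
--     if N <= 0:
--         return 0
--     s = str(N)
--     n = len(s)
--     # f[L][t]: count of length-L strings over digits 1..9 with digit sum t
--     f = [[1]]
--     for L in range(1, n):
--         prev = f[-1]
--         f.append([sum(prev[t - d] for d in range(1, 10) if 0 <= t - d < len(prev))
--                   for t in range(9 * L + 1)])
--     # numbers with fewer digits than N
--     total = 0
--     for L in range(1, n):
--         for t, c in enumerate(f[L]):
--             if t % k == 0: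
--                 total += c
--     # n-digit numbers <= N: place a smaller digit at one position, suffix free
--     p = 0
--     for ch, row in zip(s, reversed(f)):
--         d0 = int(ch)
--         for d in range(1, d0):
--             for t, c in enumerate(row):
--                 if (p + d + t) % k == 0:
--                     total += c
--         if d0 == 0:
--             break
--         p += d0
--     else:
--         if p % k == 0:
--             total += 1
--     return total
-- ===== Notes on version B (the rewrite author's own statement) =====
-- stated objective: alternative
-- what changed: Replaces A's memoized top-down digit-DP recursion (pos, rem, tight, started) with a precomputed k-independent table f[L][t] of counts of length-L no-zero digit strings of digit sum t, followed by a single left-to-right positional pass over str(N).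
import Mathlib
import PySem

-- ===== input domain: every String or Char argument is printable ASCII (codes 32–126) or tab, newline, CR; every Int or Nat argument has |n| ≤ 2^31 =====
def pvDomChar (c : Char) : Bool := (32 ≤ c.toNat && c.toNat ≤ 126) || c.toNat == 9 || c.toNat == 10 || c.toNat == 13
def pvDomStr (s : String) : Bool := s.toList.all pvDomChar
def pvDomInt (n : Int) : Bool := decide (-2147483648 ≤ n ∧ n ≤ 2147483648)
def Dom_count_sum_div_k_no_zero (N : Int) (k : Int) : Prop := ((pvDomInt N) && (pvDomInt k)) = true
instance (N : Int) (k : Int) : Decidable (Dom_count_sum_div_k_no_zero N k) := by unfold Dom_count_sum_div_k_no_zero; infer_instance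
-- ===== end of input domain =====

-- B replaces A's memoized top-down digit DP by a k-independent digit-sum table plus one
-- positional pass (objective: alternative, same cost).

-- ===== PORT A =====
-- Python A's inner `dp` carries an lru_cache; the port threads that cache explicitly as an
-- association dict keyed by (pos, rem, tight, started), the position being represented by
-- the remaining suffix of str(N) (key component = its length, a bijection for a fixed s).
def pvA_dp (k : Int) : (s : List Char) → Int → Bool → Bool →
    PySem.Dict (Int × Int × Bool × Bool) Int →
    Int × PySem.Dict (Int × Int × Bool × Bool) Int
  | [], rem, tight, started, cache =>
    match PySem.Dict.get? cache (0, rem, tight, started) with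
    | some v => (v, cache)
    | none =>
      let v : Int := if started && rem == 0 then 1 else 0
      (v, PySem.Dict.insert cache (0, rem, tight, started) v)
  | c :: rest, rem, tight, started, cache =>
    match PySem.Dict.get? cache (PySem.List.len (c :: rest), rem, tight, started) with
    | some v => (v, cache)
    | none =>
      -- limit = int(s[pos]) if tight else 9  (int of a single character; Pre_ excludes N < 0,
      -- where Python's int('-') raises ValueError)
      let limit : Int := if tight then (PySem.Int.ofChars? [c]).getD 0 else 9
      let r := (PySem.List.pyRange 0 (limit + 1)).foldl
        (fun (acc : Int × PySem.Dict (Int × Int × Bool × Bool) Int) d =>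
          if started && d == 0 then acc
          else if !started && d == 0 then
            let q := pvA_dp k rest 0 (tight && (d == limit)) false acc.2
            (acc.1 + q.1, q.2)
          else
            let q := pvA_dp k rest (PySem.Int.mod (rem + d) k) (tight && (d == limit)) true acc.2
            (acc.1 + q.1, q.2))
        (0, cache)
      (r.1, PySem.Dict.insert r.2 (PySem.List.len (c :: rest), rem, tight, started) r.1)
  termination_by s => s.length

def count_sum_div_k_no_zero (N : Int) (k : Int) : Int :=
  (pvA_dp k (PySem.Int.toChars N) 0 true false ⟨[]⟩).1

-- ===== PORT B =====
-- f.append([sum(prev[t-d] for d in range(1,10) if 0 <= t-d < len(prev)) for t in range(9*L+1)])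
def pvB_row (prev : List Int) (L : Int) : List Int :=
  (PySem.List.pyRange 0 (9 * L + 1)).map (fun t =>
    (((PySem.List.pyRange 1 10).filter
        (fun d => decide (0 ≤ t - d) && decide (t - d < PySem.List.len prev))).map
      (fun d => PySem.List.pyGetD prev (t - d) 0)).sum)

-- the `for ch, row in zip(s, reversed(f))` loop, with its for-else (break ⇒ no +1 at the end)
def pvB_scan (k : Int) : List (Char × List Int) → Int → Int → Int
  | [], p, total => if PySem.Int.mod p k == 0 then total + 1 else total
  | (ch, row) :: rest, p, total =>
    let d0 : Int := (PySem.Int.ofChars? [ch]).getD 0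
    let total :=
      (PySem.List.pyRange 1 d0).foldl
        (fun tot d =>
          (PySem.List.enumerate row).foldl
            (fun tot2 tc => if PySem.Int.mod (p + d + tc.1) k == 0 then tot2 + tc.2 else tot2)
            tot)
        total
    if d0 == 0 then total else pvB_scan k rest (p + d0) total

def count_sum_div_k_no_zero_alt (N : Int) (k : Int) : Int :=
  if N ≤ 0 then 0
  else
    let s := PySem.Int.toChars N
    let n : Int := PySem.List.len s
    let f := (PySem.List.pyRange 1 n).foldl
      (fun f L => f ++ [pvB_row (PySem.List.pyGetD f (-1) []) L]) [[(1 : Int)]]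
    let total := (PySem.List.pyRange 1 n).foldl
      (fun tot L =>
        (PySem.List.enumerate (PySem.List.pyGetD f L [])).foldl
          (fun t2 tc => if PySem.Int.mod tc.1 k == 0 then t2 + tc.2 else t2) tot)
      0
    pvB_scan k (s.zip f.reverse) 0 total

-- ===== PRECONDITION & SPEC =====
-- Pre_ excludes exactly the inputs where Python A raises: N < 0 (ValueError from int('-'))
-- and N ≥ 1 with k = 0 (ZeroDivisionError in (rem + d) % k).
def Pre_count_sum_div_k_no_zero (N : Int) (k : Int) : Prop := 0 ≤ N ∧ (N = 0 ∨ k ≠ 0)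
instance (N : Int) (k : Int) : Decidable (Pre_count_sum_div_k_no_zero N k) := by
  unfold Pre_count_sum_div_k_no_zero; infer_instance
def pvWitness_count_sum_div_k_no_zero : Int × Int := (99, 3)

def Spec_count_sum_div_k_no_zero (N : Int) (k : Int) (out : Int) : Prop :=
  out = count_sum_div_k_no_zero_alt N k
instance (N : Int) (k : Int) (out : Int) : Decidable (Spec_count_sum_div_k_no_zero N k out) := by
  unfold Spec_count_sum_div_k_no_zero; infer_instance

-- ===== CLAIM (what is proved, stated in full; the proofs are below) =====
def Claim_equal_count_sum_div_k_no_zero : Prop := ∀ (N : Int) (k : Int), Dom_count_sum_div_k_no_zero N k → Pre_count_sum_div_k_no_zero N k → Spec_count_sum_div_k_no_zero N k (count_sum_div_k_no_zero N k)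

-- ===== LEMMAS AND PROOFS =====

def pvV (c : Char) : Int := (PySem.Int.ofChars? [c]).getD 0

-- 1: mod congruence
lemma pv_mod_cong (k x y : Int) (h : k ∣ (x - y)) : PySem.Int.mod x k = PySem.Int.mod y k := by
  rcases eq_or_ne k 0 with hk | hk
  · subst hk
    obtain rfl : x = y := by have := Int.zero_dvd.mp h; omega
    rfl
  obtain ⟨c, hc⟩ := h
  have hx := PySem.Int.floordiv_mul_add_mod x k
  have hy := PySem.Int.floordiv_mul_add_mod y k
  rcases lt_or_gt_of_ne hk with hneg | hpos
  · have bx := PySem.Int.mod_neg_bounds x hneg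
    have by' := PySem.Int.mod_neg_bounds y hneg
    set qx := PySem.Int.floordiv x k
    set qy := PySem.Int.floordiv y k
    have : PySem.Int.mod x k - PySem.Int.mod y k = k * (c - qx + qy) := by
      have : x - y = k * c := hc
      nlinarith [hx, hy]
    rcases eq_or_ne (c - qx + qy) 0 with h0 | h0
    · rw [h0, mul_zero] at this; omega
    · have h1 : 1 ≤ |c - qx + qy| := Int.one_le_abs h0
      have hak : |k| = -k := abs_of_neg hneg
      have h2 : |PySem.Int.mod x k - PySem.Int.mod y k| < |k| := by
        rw [abs_lt]; omega
      rw [this, abs_mul] at h2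
      nlinarith [abs_nonneg k, abs_pos.mpr hk]
  · have bx1 := PySem.Int.mod_nonneg x hpos
    have bx2 := PySem.Int.mod_lt x hpos
    have by1 := PySem.Int.mod_nonneg y hpos
    have by2 := PySem.Int.mod_lt y hpos
    set qx := PySem.Int.floordiv x k
    set qy := PySem.Int.floordiv y k
    have heq : PySem.Int.mod x k - PySem.Int.mod y k = k * (c - qx + qy) := by
      have : x - y = k * c := hc
      nlinarith [hx, hy]
    rcases eq_or_ne (c - qx + qy) 0 with h0 | h0
    · rw [h0, mul_zero] at heq; omega
    · have h1 : 1 ≤ |c - qx + qy| := Int.one_le_abs h0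
      have hak : |k| = k := abs_of_pos hpos
      have h2 : |PySem.Int.mod x k - PySem.Int.mod y k| < |k| := by
        rw [abs_lt]; omega
      rw [heq, abs_mul] at h2
      nlinarith [abs_nonneg k, abs_pos.mpr hk]

lemma pv_mod_add_left (k a b : Int) :
    PySem.Int.mod (PySem.Int.mod a k + b) k = PySem.Int.mod (a + b) k := by
  apply pv_mod_cong
  have := PySem.Int.floordiv_mul_add_mod a k
  exact ⟨-(PySem.Int.floordiv a k), by linarith [this, mul_comm (PySem.Int.floordiv a k) k]⟩

-- digit facts
lemma pv_digitChar_val (m : Nat) (h : m < 10) : pvV (Nat.digitChar m) = (m : Int) := by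
  interval_cases m <;> decide

lemma pv_suffix_eq (s t u : List Char) (h1 : s <:+ u) (h2 : t <:+ u) (h3 : s.length = t.length) :
    s = t := by
  obtain ⟨a, ha⟩ := h1
  obtain ⟨b, hb⟩ := h2
  have h : a ++ s = b ++ t := by rw [ha, hb]
  exact (List.append_inj' h h3).2

lemma pv_toDigitsCore_spec :
    ∀ fuel n (ds : List Char), n < fuel →
      ∃ out : List Char, Nat.toDigitsCore 10 fuel n ds = out ++ ds ∧ out ≠ [] ∧
        (∀ c ∈ out, ∃ m : Nat, m < 10 ∧ c = Nat.digitChar m) ∧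
        (n ≠ 0 → ∃ m : Nat, 0 < m ∧ m < 10 ∧ out.head? = some (Nat.digitChar m)) := by
  intro fuel
  induction fuel with
  | zero => omega
  | succ f ih =>
    intro n ds hn
    rw [Nat.toDigitsCore]
    by_cases h0 : n / 10 = 0
    · simp only [h0]
      refine ⟨[(n % 10).digitChar], rfl, by simp, ?_, ?_⟩
      · intro c hc; simp at hc; subst hc; exact ⟨n % 10, by omega, rfl⟩
      · intro hne; exact ⟨n % 10, by omega, by omega, by simp⟩
    · simp only [h0]
      obtain ⟨out, heq, hne, hdig, hhead⟩ := ih (n / 10) ((n % 10).digitChar :: ds) (by omega)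
      refine ⟨out ++ [(n % 10).digitChar], by rw [heq]; simp, by simp [hne], ?_, ?_⟩
      · intro c hc
        rcases List.mem_append.mp hc with h | h
        · exact hdig c h
        · simp at h; subst h; exact ⟨n % 10, by omega, rfl⟩
      · intro _
        obtain ⟨m, hm0, hm10, hh⟩ := hhead h0
        exact ⟨m, hm0, hm10, by rw [List.head?_append_of_ne_nil] <;> simp_all⟩

lemma pv_toChars_pos (N : Int) (h : 1 ≤ N) :
    ∃ c rest, PySem.Int.toChars N = c :: rest ∧
      (∀ x ∈ c :: rest, ∃ m : Nat, m < 10 ∧ x = Nat.digitChar m) ∧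
      1 ≤ pvV c ∧ pvV c ≤ 9 := by
  have hN : ¬ N < 0 := by omega
  obtain ⟨out, heq, hne, hdig, hhead⟩ :=
    pv_toDigitsCore_spec (N.toNat + 1) N.toNat [] (by omega)
  have htc : PySem.Int.toChars N = out := by
    simp [PySem.Int.toChars, hN, Nat.toDigits, heq]
  obtain ⟨m, hm0, hm10, hh⟩ := hhead (by omega)
  obtain ⟨c, rest, rfl⟩ := List.exists_cons_of_ne_nil hne
  simp at hh
  refine ⟨c, rest, htc, hdig, ?_, ?_⟩ <;>
    rw [hh, pv_digitChar_val m hm10] <;> omega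

-- weighted count of a row: sum of entries whose (offset + index) is divisible by k
def pvE (k : Int) : List Int → Int → Int
  | [], _ => 0
  | c :: cs, y => (if PySem.Int.mod y k == 0 then c else 0) + pvE k cs (y + 1)

lemma pvE_eq_sum (k : Int) : ∀ (xs : List Int) (y : Int),
    pvE k xs y = ∑ t ∈ Finset.range xs.length,
      (if PySem.Int.mod (y + t) k == 0 then xs.getD t 0 else 0) := by
  intro xs
  induction xs with
  | nil => simp [pvE]
  | cons c cs ih =>
    intro y
    rw [pvE, ih (y + 1), List.length_cons, Finset.sum_range_succ']
    simp only [List.getD_cons_succ, List.getD_cons_zero]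
    rw [add_comm]
    congr 1
    · apply Finset.sum_congr rfl
      intro t _
      have : y + 1 + (t : Int) = y + ((t : Nat) + 1 : Nat) := by push_cast; ring
      rw [this]
    · simp

lemma pv_filter_map_sum (p : Int → Bool) (h : Int → Int) :
    ∀ xs : List Int, ((xs.filter p).map h).sum = (xs.map (fun x => if p x then h x else 0)).sum := by
  intro xs
  induction xs with
  | nil => rfl
  | cons x xs ih =>
    rw [List.filter_cons]
    split_ifs with hp <;> simp [List.map_cons, List.sum_cons, ih, hp]

lemma pv_pyRange_one_ten : PySem.List.pyRange 1 10 = [1, 2, 3, 4, 5, 6, 7, 8, 9] := by decide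

lemma pv_map_sum_range9 (q : Int → Int) :
    ((PySem.List.pyRange 1 10).map q).sum = ∑ d ∈ Finset.range 9, q ((d : Int) + 1) := by
  rw [pv_pyRange_one_ten]
  simp [Finset.sum_range_succ]
  ring

lemma pv_shift_sum (F : Nat → Int) (d K M : Nat) (h : d + K ≤ M) :
    (∑ t ∈ Finset.range M, if d ≤ t ∧ t - d < K then F (t - d) else 0)
      = ∑ u ∈ Finset.range K, F u := by
  rw [← Finset.sum_filter]
  apply Finset.sum_nbij' (fun t => t - d) (fun u => u + d)
  case hi => intro a ha; simp only [Finset.mem_filter, Finset.mem_range] at *; omega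
  case hj => intro a ha; simp only [Finset.mem_filter, Finset.mem_range] at *; omega
  case left_neg => intro a ha; rw [Finset.mem_filter, Finset.mem_range] at ha; exact Nat.sub_add_cancel ha.2.1
  case right_neg => intro a ha; omega
  case h => intro a ha; rfl

lemma pv_len_pvB_row (prev : List Int) (L : Int) :
    (pvB_row prev L).length = (9 * L + 1).toNat := by
  simp [pvB_row, PySem.List.length_pyRange_one]

lemma pv_rowsum (k : Int) (prev : List Int) (L : Int)
    (hL : 9 * L + 1 = (prev.length : Int) + 9) (y : Int) :
    pvE k (pvB_row prev L) y = ∑ d ∈ Finset.range 9, pvE k prev (y + ((d : Int) + 1)) := by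
  have hlen : (pvB_row prev L).length = prev.length + 9 := by
    rw [pv_len_pvB_row]; omega
  rw [pvE_eq_sum, hlen]
  have hterm : ∀ t ∈ Finset.range (prev.length + 9),
      (if PySem.Int.mod (y + t) k == 0 then (pvB_row prev L).getD t 0 else 0)
      = ∑ d ∈ Finset.range 9,
          (if (d + 1 ≤ t ∧ t - (d + 1) < prev.length) ∧ PySem.Int.mod (y + t) k == 0
            then prev.getD (t - (d + 1)) 0 else 0) := by
    intro t ht
    rw [Finset.mem_range] at ht
    have ht' : t < (pvB_row prev L).length := by omega
    have hget : (pvB_row prev L).getD t 0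
        = ∑ d ∈ Finset.range 9,
            (if (d + 1 ≤ t ∧ t - (d + 1) < prev.length) then prev.getD (t - (d + 1)) 0 else 0) := by
      rw [List.getD_eq_getElem _ _ ht']
      simp only [pvB_row, List.getElem_map, PySem.List.getElem_pyRange_one, zero_add]
      rw [pv_filter_map_sum, pv_map_sum_range9]
      apply Finset.sum_congr rfl
      intro d hd
      rw [Finset.mem_range] at hd
      simp only [PySem.List.len_eq, Bool.and_eq_true, decide_eq_true_eq]
      by_cases hb : d + 1 ≤ t ∧ t - (d + 1) < prev.length
      · have hb1 : (0 : Int) ≤ (t : Int) - ((d : Int) + 1) := by omega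
        have hb2 : (t : Int) - ((d : Int) + 1) < (prev.length : Int) := by omega
        rw [if_pos ⟨hb1, hb2⟩, if_pos hb]
        rw [PySem.List.pyGetD_eq_getElem prev 0 hb1 hb2]
        rw [List.getD_eq_getElem prev 0 (by omega)]
        congr 1
        omega
      · rw [if_neg, if_neg hb]
        intro ⟨c1, c2⟩
        exact hb ⟨by omega, by omega⟩
    rw [hget]
    by_cases hχ : (PySem.Int.mod (y + t) k == 0) = true
    · rw [if_pos hχ]
      apply Finset.sum_congr rfl
      intro d _
      by_cases hb : d + 1 ≤ t ∧ t - (d + 1) < prev.length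
      · rw [if_pos hb, if_pos ⟨hb, hχ⟩]
      · rw [if_neg hb, if_neg (by tauto)]
    · rw [if_neg hχ]
      symm
      apply Finset.sum_eq_zero
      intro d _
      rw [if_neg (by tauto)]
  rw [Finset.sum_congr rfl hterm, Finset.sum_comm]
  apply Finset.sum_congr rfl
  intro d hd
  rw [Finset.mem_range] at hd
  rw [pvE_eq_sum]
  have hs := pv_shift_sum
    (fun u => if PySem.Int.mod (y + ((d : Int) + 1) + (u : Int)) k == 0 then prev.getD u 0 else 0)
    (d + 1) prev.length (prev.length + 9) (by omega)
  rw [← hs]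
  beta_reduce
  apply Finset.sum_congr rfl
  intro t ht
  rw [Finset.mem_range] at ht
  by_cases hb : d + 1 ≤ t ∧ t - (d + 1) < prev.length
  · by_cases hχ : (PySem.Int.mod (y + t) k == 0) = true
    · rw [if_pos ⟨hb, hχ⟩, if_pos hb]
      rw [if_pos]
      have : y + ((d : Int) + 1) + ((t - (d + 1) : Nat) : Int) = y + t := by
        push_cast [Nat.cast_sub hb.1]
        ring
      rw [this]
      exact hχ
    · rw [if_neg (by tauto), if_pos hb, if_neg]
      have : y + ((d : Int) + 1) + ((t - (d + 1) : Nat) : Int) = y + t := by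
        push_cast [Nat.cast_sub hb.1]
        ring
      rw [this]
      exact hχ
  · rw [if_neg (by tauto), if_neg hb]

def pvR : Nat → List Int
  | 0 => [1]
  | L + 1 => pvB_row (pvR L) ((L : Int) + 1)

lemma pv_len_pvR : ∀ L : Nat, (pvR L).length = 9 * L + 1 := by
  intro L
  cases L with
  | zero => rfl
  | succ L => rw [pvR, pv_len_pvB_row]; omega

def pvG (k : Int) : Nat → Int → Int
  | 0, r => if r == 0 then 1 else 0
  | L + 1, r => (PySem.List.pyRange 1 10).foldl
      (fun total d => total + pvG k L (PySem.Int.mod (r + d) k)) 0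

lemma pvG_succ (k : Int) (L : Nat) (r : Int) :
    pvG k (L + 1) r = ∑ d ∈ Finset.range 9, pvG k L (PySem.Int.mod (r + ((d : Int) + 1)) k) := by
  rw [pvG, PySem.List.foldl_add, zero_add, pv_map_sum_range9]

lemma pv_bridge (k : Int) : ∀ (L : Nat) (y : Int),
    pvG k L (PySem.Int.mod y k) = pvE k (pvR L) y := by
  intro L
  induction L with
  | zero => intro y; simp [pvG, pvE, pvR]
  | succ L ih =>
    intro y
    rw [pvG_succ]
    have : ∀ d ∈ Finset.range 9,
        pvG k L (PySem.Int.mod (PySem.Int.mod y k + ((d : Int) + 1)) k)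
          = pvE k (pvR L) (y + ((d : Int) + 1)) := by
      intro d _
      rw [pv_mod_add_left, ← ih (y + ((d : Int) + 1))]
    rw [Finset.sum_congr rfl this, pvR, ← pv_rowsum]
    rw [pv_len_pvR]
    push_cast
    ring

def pvDp (k : Int) : List Char → Int → Bool → Bool → Int
  | [], rem, _tight, started => if started && rem == 0 then 1 else 0
  | c :: rest, rem, tight, started =>
    let limit : Int := if tight then pvV c else 9
    (PySem.List.pyRange 0 (limit + 1)).foldl
      (fun total d =>
        if started && d == 0 then total
        else if !started && d == 0 then total + pvDp k rest 0 (tight && (d == limit)) false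
        else total + pvDp k rest (PySem.Int.mod (rem + d) k) (tight && (d == limit)) true)
      0

lemma pv_pyRange_zero_ten : PySem.List.pyRange 0 10 = 0 :: PySem.List.pyRange 1 10 := by decide

lemma pvDp_free (k : Int) : ∀ (t : List Char) (r : Int),
    pvDp k t r false true = pvG k t.length r := by
  intro t
  induction t with
  | nil => intro r; simp [pvDp, pvG]
  | cons c rest ih =>
    intro r
    simp only [pvDp, if_neg Bool.false_ne_true]
    have h10 : (9 : Int) + 1 = 10 := by norm_num
    rw [h10, pv_pyRange_zero_ten, List.foldl_cons]
    norm_num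
    rw [PySem.List.foldl_congr_mem _ _
      (fun total d => total + pvG k rest.length (PySem.Int.mod (r + d) k)) 0 ?_]
    · rw [pvG]
    · intro acc d hd
      rw [PySem.List.mem_pyRange_one] at hd
      have hd0 : (d == 0) = false := by simp; omega
      simp only [hd0, ih]
      rw [if_neg (by omega)]

def pvSU (k : Int) : Nat → Int
  | 0 => 0
  | L + 1 => (PySem.List.pyRange 1 10).foldl
      (fun total d => total + pvG k L (PySem.Int.mod (0 + d) k)) (pvSU k L)

lemma pvDp_unstarted (k : Int) : ∀ (t : List Char),
    pvDp k t 0 false false = pvSU k t.length := by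
  intro t
  induction t with
  | nil => simp [pvDp, pvSU]
  | cons c rest ih =>
    simp only [pvDp, if_neg Bool.false_ne_true]
    have h10 : (9 : Int) + 1 = 10 := by norm_num
    rw [h10, pv_pyRange_zero_ten, List.foldl_cons]
    norm_num [ih]
    rw [PySem.List.foldl_congr_mem _ _
      (fun total d => total + pvG k rest.length (PySem.Int.mod (0 + d) k)) (pvSU k rest.length) ?_]
    · rw [pvSU]
    · intro acc d hd
      rw [PySem.List.mem_pyRange_one] at hd
      have hd0 : (d == 0) = false := by simp; omega
      simp only [hd0, Bool.false_and, Bool.not_false, Bool.true_and,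
        if_neg Bool.false_ne_true, pvDp_free k rest]
      norm_num
      exact fun h => absurd h (by omega)

def pvMR : Nat → List (List Int)
  | 0 => []
  | L + 1 => pvR L :: pvMR L

lemma pv_enum_fold (k : Int) : ∀ (row : List Int) (b i acc : Int),
    (PySem.List.enumerate row i).foldl
        (fun t2 tc => if PySem.Int.mod (b + tc.1) k == 0 then t2 + tc.2 else t2) acc
      = acc + pvE k row (b + i) := by
  intro row
  induction row with
  | nil => intro b i acc; simp [PySem.List.enumerate, pvE]
  | cons c cs ih =>
    intro b i acc
    rw [PySem.List.enumerate_cons, List.foldl_cons, ih b (i + 1), pvE]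
    have : b + i + 1 = b + (i + 1) := by ring
    rw [this]
    split_ifs <;> ring

lemma pv_tight (k : Int) : ∀ (t : List Char),
    (∀ c ∈ t, 0 ≤ pvV c ∧ pvV c ≤ 9) → ∀ (y total : Int),
    pvB_scan k (t.zip (pvMR t.length)) y total = total + pvDp k t (PySem.Int.mod y k) true true := by
  intro t
  induction t with
  | nil =>
    intro _ y total
    simp only [List.zip_nil_left, pvB_scan, pvDp, Bool.true_and]
    split_ifs <;> ring
  | cons c rest ih =>
    intro hdig y total
    obtain ⟨hc0, hc9⟩ := hdig c List.mem_cons_self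
    have hrest : ∀ x ∈ rest, 0 ≤ pvV x ∧ pvV x ≤ 9 := fun x hx => hdig x (List.mem_cons_of_mem c hx)
    rw [List.length_cons, pvMR, List.zip_cons_cons, pvB_scan]
    by_cases hd0 : pvV c = 0
    · -- digit 0: B breaks, A's loop contributes nothing
      have hb : PySem.List.pyRange 1 ((PySem.Int.ofChars? [c]).getD 0) = [] := by
        rw [show (PySem.Int.ofChars? [c]).getD 0 = pvV c from rfl, hd0]
        exact PySem.List.pyRange_one_eq_nil (by norm_num)
      rw [hb, List.foldl_nil, if_pos (by rw [show (PySem.Int.ofChars? [c]).getD 0 = pvV c from rfl, hd0]; rfl)]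
      rw [pvDp]
      simp only [eq_self_iff_true, if_true]
      rw [hd0]
      have : PySem.List.pyRange 0 (0 + 1) = [0] := PySem.List.pyRange_one_singleton 0
      rw [this, List.foldl_cons, List.foldl_nil]
      norm_num
    · -- digit ≥ 1
      have hge1 : 1 ≤ pvV c := by omega
      have hV : (PySem.Int.ofChars? [c]).getD 0 = pvV c := rfl
      rw [hV]
      -- B's inner loop
      rw [PySem.List.foldl_congr_mem _ _
        (fun tot d => tot + pvE k (pvR rest.length) (y + d)) total ?_]
      swap
      · intro acc d _
        rw [pv_enum_fold k (pvR rest.length) (y + d) 0 acc, add_zero]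
      rw [if_neg (by simp; omega)]
      rw [ih hrest (y + pvV c)]
      -- A's loop
      rw [pvDp]
      simp only [eq_self_iff_true, if_true]
      rw [PySem.List.pyRange_one_cons (show (0:Int) < pvV c + 1 by omega), List.foldl_cons]
      norm_num
      rw [PySem.List.pyRange_one_append 1 (pvV c) (pvV c + 1) hge1 (by omega),
        show PySem.List.pyRange (pvV c) (pvV c + 1) = [pvV c] from PySem.List.pyRange_one_singleton _,
        List.foldl_append, List.foldl_cons, List.foldl_nil]
      rw [PySem.List.foldl_congr_mem _ _
        (fun tot d => tot + pvE k (pvR rest.length) (y + d)) 0 ?_]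
      swap
      · intro acc d hd
        rw [PySem.List.mem_pyRange_one] at hd
        have h1 : (d == 0) = false := by simp; omega
        have h2 : (d == pvV c) = false := by simp; omega
        simp only [h1, h2, Bool.and_false, Bool.true_and, if_neg Bool.false_ne_true,
          pvDp_free k rest]
        rw [pv_mod_add_left, pv_bridge k rest.length (y + d)]
        rw [if_neg (by omega)]
      rw [if_neg hd0, pv_mod_add_left, beq_self_eq_true, PySem.List.foldl_add, PySem.List.foldl_add]
      ring

def pvCacheOK (k : Int) (s0 : List Char)
    (cache : PySem.Dict (Int × Int × Bool × Bool) Int) : Prop :=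
  ∀ L rem t st v, cache.get? (L, rem, t, st) = some v →
    ∃ s : List Char, s <:+ s0 ∧ PySem.List.len s = L ∧ v = pvDp k s rem t st

lemma pv_cache_hit (k : Int) (s0 s : List Char) (cache : PySem.Dict (Int × Int × Bool × Bool) Int)
    (hOK : pvCacheOK k s0 cache) (hs : s <:+ s0) (rem : Int) (t st : Bool) (v : Int)
    (hget : cache.get? (PySem.List.len s, rem, t, st) = some v) : v = pvDp k s rem t st := by
  obtain ⟨s', hs', hlen, hv⟩ := hOK _ _ _ _ _ hget
  have : s' = s := by
    apply pv_suffix_eq s' s s0 hs' hs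
    simp only [PySem.List.len_eq] at hlen
    exact_mod_cast hlen
  rw [hv, this]

lemma pv_cache_insert (k : Int) (s0 s : List Char)
    (cache : PySem.Dict (Int × Int × Bool × Bool) Int)
    (hOK : pvCacheOK k s0 cache) (hs : s <:+ s0) (rem : Int) (t st : Bool) :
    pvCacheOK k s0 (cache.insert (PySem.List.len s, rem, t, st) (pvDp k s rem t st)) := by
  intro L rem' t' st' v hget
  rw [PySem.Dict.get?_insert] at hget
  split_ifs at hget with he
  · simp only [Prod.ext_iff] at he
    obtain ⟨h1, h2, h3, h4⟩ := he
    subst h1; subst h2; subst h3; subst h4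
    refine ⟨s, hs, rfl, ?_⟩
    injection hget with hv
    exact hv.symm
  · exact hOK _ _ _ _ _ hget

lemma pv_memo_nil (k : Int) (s0 : List Char) (rem : Int) (t st : Bool)
    (cache : PySem.Dict (Int × Int × Bool × Bool) Int) (hOK : pvCacheOK k s0 cache) :
    (pvA_dp k [] rem t st cache).1 = pvDp k [] rem t st ∧
      pvCacheOK k s0 (pvA_dp k [] rem t st cache).2 := by
  simp only [pvA_dp]
  cases hget : PySem.Dict.get? cache (0, rem, t, st) with
  | some v =>
    constructor
    · exact pv_cache_hit k s0 [] cache hOK List.nil_suffix rem t st v (by simpa using hget)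
    · exact hOK
  | none =>
    constructor
    · rfl
    · have h := pv_cache_insert k s0 [] cache hOK List.nil_suffix rem t st
      simpa [pvDp] using h

lemma pv_memo (k : Int) (s0 : List Char) :
    ∀ (n : Nat) (s : List Char), s.length ≤ n → s <:+ s0 →
      ∀ (rem : Int) (t st : Bool) (cache : PySem.Dict (Int × Int × Bool × Bool) Int),
        pvCacheOK k s0 cache →
        (pvA_dp k s rem t st cache).1 = pvDp k s rem t st ∧
          pvCacheOK k s0 (pvA_dp k s rem t st cache).2 := by
  intro n
  induction n with
  | zero =>
    intro s hlen hs rem t st cache hOK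
    obtain rfl : s = [] := List.length_eq_zero_iff.mp (by omega)
    exact pv_memo_nil k s0 rem t st cache hOK
  | succ n ihn =>
    intro s hlen hs rem t st cache hOK
    cases s with
    | nil => exact pv_memo_nil k s0 rem t st cache hOK
    | cons c rest =>
      have hrsub : rest <:+ s0 := (List.suffix_cons c rest).trans hs
      have hrlen : rest.length ≤ n := by simp at hlen; omega
      simp only [pvA_dp]
      cases hget : PySem.Dict.get? cache (PySem.List.len (c :: rest), rem, t, st) with
      | some v =>
        constructor
        · exact pv_cache_hit k s0 (c :: rest) cache hOK hs rem t st v hget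
        · exact hOK
      | none =>
        have inner : ∀ (ds : List Int) (acc : Int × PySem.Dict (Int × Int × Bool × Bool) Int),
            pvCacheOK k s0 acc.2 →
            (ds.foldl
              (fun acc d =>
                if st && d == 0 then acc
                else if !st && d == 0 then
                  let q := pvA_dp k rest 0 (t && (d == (if t then (PySem.Int.ofChars? [c]).getD 0 else 9))) false acc.2
                  (acc.1 + q.1, q.2)
                else
                  let q := pvA_dp k rest (PySem.Int.mod (rem + d) k) (t && (d == (if t then (PySem.Int.ofChars? [c]).getD 0 else 9))) true acc.2
                  (acc.1 + q.1, q.2)) acc).1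
              = ds.foldl
                  (fun total d =>
                    if st && d == 0 then total
                    else if !st && d == 0 then total + pvDp k rest 0 (t && (d == (if t then pvV c else 9))) false
                    else total + pvDp k rest (PySem.Int.mod (rem + d) k) (t && (d == (if t then pvV c else 9))) true) acc.1
              ∧ pvCacheOK k s0 (ds.foldl
                  (fun acc d =>
                    if st && d == 0 then acc
                    else if !st && d == 0 then
                      let q := pvA_dp k rest 0 (t && (d == (if t then (PySem.Int.ofChars? [c]).getD 0 else 9))) false acc.2
                      (acc.1 + q.1, q.2)
                    else
                      let q := pvA_dp k rest (PySem.Int.mod (rem + d) k) (t && (d == (if t then (PySem.Int.ofChars? [c]).getD 0 else 9))) true acc.2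
                      (acc.1 + q.1, q.2)) acc).2 := by
          intro ds
          induction ds with
          | nil => exact fun acc h => ⟨rfl, h⟩
          | cons d ds ihd =>
            intro acc hacc
            rw [List.foldl_cons, List.foldl_cons]
            by_cases h1 : (st && d == 0) = true
            · simp only [h1, if_true]
              exact ihd acc hacc
            · simp only [h1, if_false, Bool.not_eq_true] at *
              by_cases h2 : (!st && d == 0) = true
              · simp only [h1, h2, Bool.false_eq_true, if_true, if_false]
                obtain ⟨hv, hOK'⟩ := ihn rest hrlen hrsub 0 (t && (d == (if t then (PySem.Int.ofChars? [c]).getD 0 else 9))) false acc.2 hacc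
                obtain ⟨hv2, hOK2⟩ := ihd
                  (acc.1 + (pvA_dp k rest 0 (t && (d == (if t then (PySem.Int.ofChars? [c]).getD 0 else 9))) false acc.2).1,
                   (pvA_dp k rest 0 (t && (d == (if t then (PySem.Int.ofChars? [c]).getD 0 else 9))) false acc.2).2) hOK'
                refine ⟨?_, hOK2⟩
                rw [hv2]
                simp only [hv, pvV]
              · simp only [h1, h2, Bool.false_eq_true, if_true, if_false]
                obtain ⟨hv, hOK'⟩ := ihn rest hrlen hrsub (PySem.Int.mod (rem + d) k) (t && (d == (if t then (PySem.Int.ofChars? [c]).getD 0 else 9))) true acc.2 hacc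
                obtain ⟨hv2, hOK2⟩ := ihd
                  (acc.1 + (pvA_dp k rest (PySem.Int.mod (rem + d) k) (t && (d == (if t then (PySem.Int.ofChars? [c]).getD 0 else 9))) true acc.2).1,
                   (pvA_dp k rest (PySem.Int.mod (rem + d) k) (t && (d == (if t then (PySem.Int.ofChars? [c]).getD 0 else 9))) true acc.2).2) hOK'
                refine ⟨?_, hOK2⟩
                rw [hv2]
                simp only [hv, pvV]
        obtain ⟨hv, hOK'⟩ := inner (PySem.List.pyRange 0 ((if t then (PySem.Int.ofChars? [c]).getD 0 else 9) + 1)) (0, cache) hOK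
        have hval : (List.foldl
            (fun (acc : Int × PySem.Dict (Int × Int × Bool × Bool) Int) d =>
              if st && d == 0 then acc
              else if !st && d == 0 then
                let q := pvA_dp k rest 0 (t && (d == (if t then (PySem.Int.ofChars? [c]).getD 0 else 9))) false acc.2
                (acc.1 + q.1, q.2)
              else
                let q := pvA_dp k rest (PySem.Int.mod (rem + d) k) (t && (d == (if t then (PySem.Int.ofChars? [c]).getD 0 else 9))) true acc.2
                (acc.1 + q.1, q.2))
            (0, cache)
            (PySem.List.pyRange 0 ((if t then (PySem.Int.ofChars? [c]).getD 0 else 9) + 1))).1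
            = pvDp k (c :: rest) rem t st := by
          rw [hv]
          rfl
        refine ⟨hval, ?_⟩
        have hins := pv_cache_insert k s0 (c :: rest) _ hOK' hs rem t st
        rw [← hval] at hins
        exact hins

lemma pv_list_range_sum (f : Nat → Int) (n : Nat) :
    ((List.range n).map f).sum = ∑ j ∈ Finset.range n, f j := by
  induction n with
  | zero => rfl
  | succ m ih => rw [List.range_succ, List.map_append, List.sum_append, Finset.sum_range_succ, ih]; simp

lemma pv_cacheOK_empty (k : Int) (s0 : List Char) : pvCacheOK k s0 ⟨[]⟩ := by
  intro L rem t st v hget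
  simp [PySem.Dict.get?] at hget

lemma pv_pvSU_eq (k : Int) : ∀ m : Nat, pvSU k m = ∑ j ∈ Finset.range m, pvE k (pvR (j + 1)) 0 := by
  intro m
  induction m with
  | zero => rfl
  | succ t ih =>
    rw [Finset.sum_range_succ, ← ih, pvSU, PySem.List.foldl_add, pv_map_sum_range9]
    congr 1
    rw [← pv_bridge k (t + 1) 0, pvG_succ]
    apply Finset.sum_congr rfl
    intro d _
    rw [pv_mod_add_left, zero_add]

lemma pv_enum_fold0 (k : Int) (row : List Int) (acc : Int) :
    (PySem.List.enumerate row).foldl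
        (fun t2 tc => if PySem.Int.mod tc.1 k == 0 then t2 + tc.2 else t2) acc
      = acc + pvE k row 0 := by
  have h : (fun (t2 : Int) (tc : Int × Int) => if PySem.Int.mod tc.1 k == 0 then t2 + tc.2 else t2)
      = (fun t2 tc => if PySem.Int.mod ((0 : Int) + tc.1) k == 0 then t2 + tc.2 else t2) := by
    funext t2 tc; rw [zero_add]
  rw [h, pv_enum_fold k row 0 0 acc, add_zero]

lemma pv_build (k : Int) : ∀ m : Nat,
    (PySem.List.pyRange 1 (((m + 1 : Nat) : Int))).foldl
        (fun f L => f ++ [pvB_row (PySem.List.pyGetD f (-1) []) L]) [[(1 : Int)]]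
      = (List.range (m + 1)).map pvR := by
  intro m
  induction m with
  | zero => simp [PySem.List.pyRange_one_eq_nil, pvR]
  | succ t ih =>
    have hsplit : PySem.List.pyRange 1 (((t + 2 : Nat) : Int))
        = PySem.List.pyRange 1 (((t + 1 : Nat) : Int)) ++ [((t + 1 : Nat) : Int)] := by
      have h := PySem.List.pyRange_one_succ_right (a := 1) (b := ((t + 1 : Nat) : Int)) (by push_cast; omega)
      push_cast at h ⊢
      convert h using 2 <;> push_cast <;> ring
    rw [hsplit, List.foldl_append, ih, List.foldl_cons, List.foldl_nil]
    have hsplit2 : (List.range (t + 1)).map pvR = (List.range t).map pvR ++ [pvR t] := by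
      rw [List.range_succ, List.map_append]; rfl
    have hlast : PySem.List.pyGetD ((List.range (t + 1)).map pvR) (-1) [] = pvR t := by
      rw [hsplit2, PySem.List.pyGetD_neg_one_append_singleton]
    rw [hlast]
    have hrow : pvB_row (pvR t) (((t + 1 : Nat) : Int)) = pvR (t + 1) := by
      rw [pvR]
      congr 1
    rw [hrow]
    conv_rhs => rw [show t + 1 + 1 = (t + 1) + 1 from rfl, List.range_succ, List.map_append]
    simp

lemma pv_rev : ∀ m : Nat, ((List.range m).map pvR).reverse = pvMR m := by
  intro m
  induction m with
  | zero => rfl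
  | succ t ih => rw [List.range_succ, List.map_append, List.reverse_append, pvMR, ← ih]; simp

lemma pv_V_zero : pvV '0' = 0 := by decide

lemma pv_A_zero (k : Int) : pvDp k ['0'] 0 true false = 0 := by
  rw [pvDp]
  simp only [eq_self_iff_true, if_true, pv_V_zero]
  rw [show (0 : Int) + 1 = 0 + 1 from rfl, PySem.List.pyRange_one_singleton, List.foldl_cons,
    List.foldl_nil]
  norm_num [pvDp]

lemma pv_total0 (k : Int) (m : Nat) :
    (PySem.List.pyRange 1 ((m + 1 : Nat) : Int)).foldl
        (fun tot L =>
          (PySem.List.enumerate (PySem.List.pyGetD ((List.range (m + 1)).map pvR) L [])).foldl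
            (fun t2 tc => if PySem.Int.mod tc.1 k == 0 then t2 + tc.2 else t2) tot) 0
      = pvSU k m := by
  rw [PySem.List.foldl_congr_mem _ _ (fun tot L => tot + pvE k (pvR L.toNat) 0) 0 ?_]
  · rw [PySem.List.foldl_add, zero_add, PySem.List.pyRange_one]
    rw [List.map_map]
    have hcast : (((m + 1 : Nat) : Int) - 1).toNat = m := by omega
    rw [hcast]
    have hfun : ∀ j ∈ List.range m,
        ((fun L => pvE k (pvR L.toNat) 0) ∘ fun j : Nat => (1 : Int) + j) j
          = pvE k (pvR (j + 1)) 0 := by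
      intro j _
      simp only [Function.comp_apply]
      congr 2
      omega
    rw [List.map_congr_left hfun, pv_list_range_sum, pv_pvSU_eq]
  · intro acc L hL
    rw [PySem.List.mem_pyRange_one] at hL
    have hlen : ((List.range (m + 1)).map pvR).length = m + 1 := by simp
    have hget : PySem.List.pyGetD ((List.range (m + 1)).map pvR) L [] = pvR L.toNat := by
      rw [PySem.List.pyGetD_eq_getElem _ _ (by omega) (by rw [hlen]; push_cast; omega)]
      simp
    rw [hget, pv_enum_fold0]

lemma pv_main_pos (k : Int) (c : Char) (rest : List Char)
    (hdig : ∀ x ∈ c :: rest, 0 ≤ pvV x ∧ pvV x ≤ 9)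
    (hv1 : 1 ≤ pvV c) :
    pvB_scan k ((c :: rest).zip (pvMR (rest.length + 1))) 0 (pvSU k rest.length)
      = pvDp k (c :: rest) 0 true false := by
  have hrest : ∀ x ∈ rest, 0 ≤ pvV x ∧ pvV x ≤ 9 := fun x hx => hdig x (List.mem_cons_of_mem c hx)
  have hc9 : pvV c ≤ 9 := (hdig c List.mem_cons_self).2
  rw [pvMR, List.zip_cons_cons, pvB_scan]
  have hV : (PySem.Int.ofChars? [c]).getD 0 = pvV c := rfl
  rw [hV]
  rw [PySem.List.foldl_congr_mem _ _
    (fun tot d => tot + pvE k (pvR rest.length) (0 + d)) (pvSU k rest.length) ?_]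
  swap
  · intro acc d _
    rw [pv_enum_fold k (pvR rest.length) (0 + d) 0 acc, add_zero]
  rw [if_neg (by simp; omega)]
  rw [pv_tight k rest hrest (0 + pvV c)]
  -- A's top-level loop
  rw [pvDp]
  simp only [eq_self_iff_true, if_true]
  rw [PySem.List.pyRange_one_cons (show (0:Int) < pvV c + 1 by omega), List.foldl_cons]
  have h00 : ((0:Int) == pvV c) = false := by simp; omega
  simp only [Bool.false_and, Bool.not_false, Bool.true_and, Bool.false_eq_true, if_false,
    beq_self_eq_true, if_true, h00, Bool.and_false, pvDp_unstarted k rest]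
  rw [show (0 : Int) + 1 = 1 from rfl]
  rw [PySem.List.pyRange_one_append 1 (pvV c) (pvV c + 1) hv1 (by omega),
    show PySem.List.pyRange (pvV c) (pvV c + 1) = [pvV c] from PySem.List.pyRange_one_singleton _,
    List.foldl_append, List.foldl_cons, List.foldl_nil]
  rw [PySem.List.foldl_congr_mem _ _
    (fun tot d => tot + pvE k (pvR rest.length) (0 + d)) (0 + pvSU k rest.length) ?_]
  swap
  · intro acc d hd
    rw [PySem.List.mem_pyRange_one] at hd
    have h1 : (d == 0) = false := by simp; omega
    have h2 : (d == pvV c) = false := by simp; omega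
    simp only [h1, h2, Bool.false_eq_true, if_false, pvDp_free k rest]
    rw [pv_bridge k rest.length (0 + d)]
  have hbeq : (pvV c == pvV c) = true := beq_self_eq_true _
  have hne : (pvV c == 0) = false := by simp; omega
  simp only [h00, Bool.false_eq_true, if_false, hbeq, if_true, hne, zero_add]

lemma pv_final (N k : Int) (hPre : 0 ≤ N ∧ (N = 0 ∨ k ≠ 0)) :
    count_sum_div_k_no_zero N k = count_sum_div_k_no_zero_alt N k := by
  obtain ⟨hN0, _⟩ := hPre
  rcases eq_or_lt_of_le hN0 with hz | hpos
  · rw [count_sum_div_k_no_zero, count_sum_div_k_no_zero_alt, ← hz]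
    rw [show PySem.Int.toChars 0 = ['0'] from by decide]
    have hm := pv_memo k ['0'] 1 ['0'] (by simp) List.suffix_rfl 0 true false ⟨[]⟩
      (pv_cacheOK_empty k _)
    rw [hm.1, pv_A_zero, if_pos (le_refl (0 : Int))]
  · rw [count_sum_div_k_no_zero]
    simp only [count_sum_div_k_no_zero_alt, if_neg (show ¬ N ≤ 0 by omega)]
    obtain ⟨c, rest, hs, hdig, hv1, hv9⟩ := pv_toChars_pos N (by omega)
    have hdig' : ∀ x ∈ c :: rest, 0 ≤ pvV x ∧ pvV x ≤ 9 := by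
      intro x hx
      obtain ⟨m, hm10, rfl⟩ := hdig x hx
      rw [pv_digitChar_val m hm10]
      omega
    have hm := pv_memo k (PySem.Int.toChars N) (PySem.Int.toChars N).length
      (PySem.Int.toChars N) le_rfl List.suffix_rfl 0 true false ⟨[]⟩ (pv_cacheOK_empty k _)
    rw [hm.1, hs]
    simp only [PySem.List.len_eq, List.length_cons]
    rw [pv_build k rest.length, pv_total0 k rest.length, pv_rev (rest.length + 1)]
    exact (pv_main_pos k c rest hdig' hv1).symm

-- ===== VERDICT (by name: the statement is the Claim_ definition above) =====
theorem count_sum_div_k_no_zero_spec : Claim_equal_count_sum_div_k_no_zero := by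
  intro N k _ hPre
  unfold Pre_count_sum_div_k_no_zero at hPre
  unfold Spec_count_sum_div_k_no_zero
  exact pv_final N k hPre
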